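-- pv_equiv track=rewrite | github.com/PedroMartz89/dam2 | SGE/Python/EjFuncionesListasTuplas/8.py | diccionario_personas_posiciones
-- ===== SOURCE A (Python) =====
-- def diccionario_personas_posiciones(m):
--     D = {}
--
--     for i in range(0, len(m)):
--         for j in range(0, len(m[i])):
--             nombre = str(m[i][j])
--             if nombre not in D and nombre != "None":
--                 D[nombre] = [(i, j)] # Añadir la tupla como lista de tuplas
--             elif nombre in D and nombre is not None:
--                 coordenadas = (i, j)
--                 D[nombre].append(coordenadas)
--
--     return D
-- ===== SOURCE B (Python) =====
-- def diccionario_personas_posiciones(m):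
--     # One flat pass to list (name, position) pairs, then ordered distinct names,
--     # then one filtering scan per name.
--     flat = [(str(v), (i, j)) for i, fila in enumerate(m) for j, v in enumerate(fila)]
--     names = []
--     for nombre, _ in flat:
--         if nombre != "None" and nombre not in names:
--             names.append(nombre)
--     return {nombre: [pos for n, pos in flat if n == nombre] for nombre in names}
-- ===== Notes on version B (the rewrite author's own statement) =====
-- stated objective: alternative
-- what changed: Replaces the incremental dict-mutation over nested index loops by a flatten-once / ordered-distinct-names / one-filtering-scan-per-name decomposition built with comprehensions.
import Mathlib
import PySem

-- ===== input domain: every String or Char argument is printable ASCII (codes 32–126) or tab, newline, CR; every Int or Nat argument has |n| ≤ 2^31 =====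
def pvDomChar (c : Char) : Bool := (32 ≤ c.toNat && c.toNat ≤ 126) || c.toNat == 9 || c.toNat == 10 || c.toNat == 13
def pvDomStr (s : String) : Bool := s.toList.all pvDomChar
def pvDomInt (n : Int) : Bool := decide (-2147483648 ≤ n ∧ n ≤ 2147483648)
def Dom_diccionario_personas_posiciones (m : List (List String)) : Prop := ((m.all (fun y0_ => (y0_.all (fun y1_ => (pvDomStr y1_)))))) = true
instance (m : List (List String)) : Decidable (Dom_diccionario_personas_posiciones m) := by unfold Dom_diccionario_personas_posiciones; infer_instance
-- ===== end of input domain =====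

-- B replaces A's incremental dict mutation over nested index loops by a flatten-once /
-- ordered-distinct-names / one-filtering-scan-per-name decomposition (alternative, not faster).


-- ===== PORT A =====
-- literal port of A: nested index loops mutating a dict; 'nombre is not None' is always
-- True for a str, so the elif condition reduces to membership alone.
def diccionario_personas_posiciones (m : List (List String)) : List (String × List (Int × Int)) :=
  let D : PySem.Dict String (List (Int × Int)) :=
    (PySem.List.pyRange 0 (PySem.List.len m) 1).foldl (fun D i =>
      (PySem.List.pyRange 0 (PySem.List.len (PySem.List.pyGetD m i [])) 1).foldl (fun D j =>
        let nombre := PySem.List.pyGetD (PySem.List.pyGetD m i []) j ""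
        if ¬ D.contains nombre ∧ nombre ≠ "None" then
          D.insert nombre [(i, j)]
        else if D.contains nombre then
          D.modify nombre [] (fun l => l ++ [(i, j)])
        else D) D) PySem.Dict.empty
  D.items

-- ===== PORT B =====
-- literal port of Source B: flat list of (name, position), ordered distinct names, then a
-- filtering scan per name.
def diccionario_personas_posiciones_alt (m : List (List String)) : List (String × List (Int × Int)) :=
  let flat : List (String × (Int × Int)) :=
    (PySem.List.enumerate m 0).flatMap (fun p =>
      (PySem.List.enumerate p.2 0).map (fun q => (q.2, (p.1, q.1))))
  let names : List String :=
    flat.foldl (fun ns p => if p.1 ≠ "None" ∧ p.1 ∉ ns then ns ++ [p.1] else ns) []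
  names.map (fun n => (n, (flat.filter (fun p => p.1 == n)).map (fun p => p.2)))

-- ===== PRECONDITION & SPEC =====
def Spec_diccionario_personas_posiciones (m : List (List String)) (out : List (String × List (Int × Int))) : Prop := out = diccionario_personas_posiciones_alt m
instance (m : List (List String)) (out : List (String × List (Int × Int))) : Decidable (Spec_diccionario_personas_posiciones m out) := by unfold Spec_diccionario_personas_posiciones; infer_instance

-- ===== CLAIM (what is proved, stated in full; the proofs are below) =====
def Claim_equal_diccionario_personas_posiciones : Prop := ∀ (m : List (List String)), Dom_diccionario_personas_posiciones m → Spec_diccionario_personas_posiciones m (diccionario_personas_posiciones m)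

-- ===== LEMMAS AND PROOFS =====

-- the flat row-major (name, position) list both sides traverse
def pvFlat (m : List (List String)) : List (String × (Int × Int)) :=
  (PySem.List.enumerate m 0).flatMap (fun p =>
    (PySem.List.enumerate p.2 0).map (fun q => (q.2, (p.1, q.1))))

-- the same list with the "None" cells dropped
def pvF (m : List (List String)) : List (String × (Int × Int)) :=
  (pvFlat m).filter (fun p => p.1 != "None")

-- A's per-cell step
def pvStepA (D : PySem.Dict String (List (Int × Int))) (p : String × (Int × Int)) :
    PySem.Dict String (List (Int × Int)) :=
  if ¬ D.contains p.1 ∧ p.1 ≠ "None" then D.insert p.1 [p.2]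
  else if D.contains p.1 then D.modify p.1 [] (fun l => l ++ [p.2])
  else D

-- A's nested loops are the pvStepA fold over the flat list
theorem pvA_eq_foldl_flat (m : List (List String)) :
    diccionario_personas_posiciones m =
      ((pvFlat m).foldl pvStepA PySem.Dict.empty).items := by
  unfold diccionario_personas_posiciones pvFlat
  rw [List.foldl_flatMap]
  rw [PySem.List.enumerate_eq_map_pyRange (d := ([] : List String)), List.foldl_map]
  refine congrArg PySem.Dict.items ?_
  refine PySem.List.foldl_congr_mem _ _ _ _ ?_
  intro D i _
  simp only
  rw [PySem.List.enumerate_eq_map_pyRange (d := ""), List.foldl_map, List.foldl_map]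
  rfl

-- under the invariant that "None" is not a key, pvStepA is the grouping modify on non-"None" cells
theorem pvFoldA_eq_modify (l : List (String × (Int × Int)))
    (d : PySem.Dict String (List (Int × Int))) (hd : d.contains "None" = false) :
    l.foldl pvStepA d =
      (l.filter (fun p => p.1 != "None")).foldl
        (fun d p => d.modify p.1 [] (fun l => l ++ [p.2])) d := by
  induction l generalizing d with
  | nil => rfl
  | cons p t ih =>
    by_cases hn : p.1 = "None"
    · have hc : d.contains p.1 = false := hn ▸ hd
      simp [pvStepA, hn, hd, ih d hd]
    · have hstep : pvStepA d p = d.modify p.1 [] (fun l => l ++ [p.2]) := by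
        by_cases hc : d.contains p.1
        · simp [pvStepA, hc, hn]
        · simp only [pvStepA, hc]
          simp only [Bool.not_eq_true] at hc
          simp [hn, PySem.Dict.modify, PySem.Dict.getD_of_not_contains d [] hc]
      have hinv : (d.modify p.1 [] (fun l => l ++ [p.2])).contains "None" = false := by
        rw [PySem.Dict.contains_modify]
        simp [hd]
        exact fun h => hn h.symm
      simp [hn, List.foldl_cons, hstep, ih _ hinv]

-- B's names loop is the ordered-dedup (Set.add fold) of the filtered names
theorem pvNames_eq (l : List (String × (Int × Int))) (ns : List String) :
    l.foldl (fun ns p => if p.1 ≠ "None" ∧ p.1 ∉ ns then ns ++ [p.1] else ns) ns =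
      ((l.filter (fun p => p.1 != "None")).map (fun p => p.1)).foldl PySem.Set.add ns := by
  induction l generalizing ns with
  | nil => rfl
  | cons p t ih =>
    by_cases hn : p.1 = "None"
    · simp [hn, ih]
    · by_cases hm : p.1 ∈ ns
      · simp [hn, hm, PySem.Set.add, ih]
      · simp [hn, hm, PySem.Set.add, ih]

-- B unfolded through pvFlat (definitional)
theorem pvAlt_eq (m : List (List String)) :
    diccionario_personas_posiciones_alt m =
      ((pvFlat m).foldl (fun ns p => if p.1 ≠ "None" ∧ p.1 ∉ ns then ns ++ [p.1] else ns) []).map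
        (fun n => (n, ((pvFlat m).filter (fun p => p.1 == n)).map (fun p => p.2))) := rfl

theorem diccionario_personas_posiciones_spec' (m : List (List String)) :
    diccionario_personas_posiciones m = diccionario_personas_posiciones_alt m := by
  have hA := pvA_eq_foldl_flat m
  rw [pvFoldA_eq_modify _ _ (by simp)] at hA
  have hFm : (pvFlat m).filter (fun p => p.1 != "None") = pvF m := rfl
  rw [hFm] at hA
  set G := (pvF m).foldl (fun d p => d.modify p.1 [] (fun l => l ++ [p.2])) PySem.Dict.empty with hG
  have hnd : G.keys.Nodup := by
    exact PySem.Dict.nodup_keys_foldl_modify_key (pvF m) (fun p => p.1) []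
      (fun d p => fun l => l ++ [p.2]) PySem.Dict.empty (by simp)
  have hkeys : G.keys = PySem.Set.ofList ((pvF m).map (fun p => p.1)) := by
    rw [hG, PySem.Dict.keys_foldl_modify_key]
    simp [PySem.Set.update, PySem.Set.ofList_eq_foldl, List.foldl_map]
  have hitems : G.items = G.keys.map (fun k => (k, G.getD k [])) :=
    PySem.Dict.items_eq_map_keys G hnd []
  have hgetD : ∀ k, G.getD k [] = ((pvF m).filter (fun p => p.1 == k)).map (fun p => p.2) := by
    intro k
    rw [hG, PySem.Dict.getD_foldl_modify_append]
    simp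
  rw [hA, hitems, hkeys]
  rw [pvAlt_eq, pvNames_eq, hFm, PySem.Set.ofList_eq_foldl]
  apply List.map_congr_left
  intro n hn
  have hmem : n ∈ (pvF m).map (fun p => p.1) := by
    have := PySem.Set.mem_ofList ((pvF m).map (fun p => p.1)) n
    rw [PySem.Set.ofList_eq_foldl] at this
    exact this.mp hn
  have hne : n ≠ "None" := by
    rcases List.mem_map.mp hmem with ⟨p, hp, rfl⟩
    have := List.of_mem_filter hp
    simpa using this
  have hfilters : (pvF m).filter (fun p => p.1 == n) = (pvFlat m).filter (fun p => p.1 == n) := by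
    unfold pvF
    rw [List.filter_filter]
    apply List.filter_congr
    intro p _
    by_cases h : p.1 = n
    · simp [h, hne]
    · simp [h]
  rw [hgetD n, hfilters]

-- ===== VERDICT (by name: the statement is the Claim_ definition above) =====
theorem diccionario_personas_posiciones_spec : Claim_equal_diccionario_personas_posiciones := by
  intro m _
  exact diccionario_personas_posiciones_spec' m
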